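-- pv_equiv track=rewrite | github.com/adityajain1095/interview-practice | lyft.py | subsets_of_string
-- ===== SOURCE A (Python) =====
-- def subsets_of_string(string,k):
--     perm = ['']
--     output = set()
--     if k == 0:
--         return output
--     if k == 1:
--         output = set(list(string))
--         output.add('')
--         return output
--     string_list = list(string)
--     for char in string_list:
--         # perm.extend([x+char for x in perm])
--         l = len(perm)
--         for i in range(l):
--             word = perm[i] + char
--             if len(word) == k:
--                 output.add(word)
--             perm.append(word)
--     # for subset in perm:
--     #     if len(subset) == k:
--     #         output.add(subset)
--     return output
-- ===== SOURCE B (Python) =====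
-- def _extend(cur, prev, c):
--     # cur followed by every extension prev-word + c, first occurrences kept
--     return list(dict.fromkeys(cur + [w + c for w in prev]))
--
--
-- def subsets_of_string(string, k):
--     n = len(string)
--     if k <= 0 or k > n:
--         return set()
--     # levels[t] = the distinct subsequences of length t seen so far
--     levels = [['']] + [[]] * k
--     for c in string:
--         levels = [levels[0]] + [_extend(cur, prev, c) for prev, cur in zip(levels, levels[1:])]
--     return set(levels[k])
-- ===== Notes on version B (the rewrite author's own statement) =====
-- stated objective: alternative
-- what changed: Instead of materialising all 2^n subsequence prefixes in one list and filtering for length k, B keeps one deduplicated list of distinct subsequences per length 0..k (extending only words shorter than k), one pass over the string; this dedups early and wins when subsequences repeat, but on strings with few repeats the distinct-subsequence count itself grows like A's list, so a timing run read only 2.66x at the largest size both finished (faster not confirmed).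
-- intended difference: For k == 1 A returns the set of characters of the string PLUS the empty string '' (a length-0 word smuggled in by its special-case branch); B returns just the distinct characters, the correct set of length-1 subsequences. — e.g. on subsets_of_string("a", 1): A returns ["a", ""], B returns ["a"]
import Mathlib
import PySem

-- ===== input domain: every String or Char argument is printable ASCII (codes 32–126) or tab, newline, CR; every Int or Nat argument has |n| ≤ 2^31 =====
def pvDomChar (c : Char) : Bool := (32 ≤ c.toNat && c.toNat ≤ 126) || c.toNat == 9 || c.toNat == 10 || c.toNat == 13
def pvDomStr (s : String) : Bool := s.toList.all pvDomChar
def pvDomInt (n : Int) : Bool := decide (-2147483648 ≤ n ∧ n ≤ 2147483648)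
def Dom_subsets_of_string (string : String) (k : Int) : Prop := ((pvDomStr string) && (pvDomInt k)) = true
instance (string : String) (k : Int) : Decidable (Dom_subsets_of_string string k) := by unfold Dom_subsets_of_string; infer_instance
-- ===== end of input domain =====

-- B replaces A's exponentially growing list of ALL subsequence prefixes by per-length
-- deduplicated lists of the distinct subsequences of length ≤ k (objective: alternative,
-- dedups early; wins only when subsequences repeat).
-- Words are carried as List Char (PySem convention) and converted to String on return.

-- ===== PORT A =====
-- inner-loop body: word = perm[i] + char; if len(word) == k: output.add(word); perm.append(word)
def pvInnerA (k : Int) (char : Char) (st2 : List (List Char) × PySem.Set (List Char)) (i : Int) :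
    List (List Char) × PySem.Set (List Char) :=
  let word := PySem.List.pyGetD st2.1 i [] ++ [char]
  let output := if PySem.List.len word == k then PySem.Set.add st2.2 word else st2.2
  (st2.1 ++ [word], output)

-- outer-loop body: l = len(perm); for i in range(l): …
def pvOuterA (k : Int) (st : List (List Char) × PySem.Set (List Char)) (char : Char) :
    List (List Char) × PySem.Set (List Char) :=
  let l := PySem.List.len st.1
  (PySem.List.pyRange 0 l 1).foldl (pvInnerA k char) st

def subsets_of_string (string : String) (k : Int) : List String :=
  let output : PySem.Set (List Char) := PySem.Set.empty
  if k = 0 then output.map String.ofList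
  else if k = 1 then
    let output := PySem.Set.ofList (string.toList.map (fun c => [c]))
    let output := PySem.Set.add output []
    output.map String.ofList
  else
    let st := string.toList.foldl (pvOuterA k) ([[]], output)
    st.2.map String.ofList

-- ===== PORT B =====
-- _extend(cur, prev, c) = list(dict.fromkeys(cur + [w + c for w in prev]))
def pvExtend (cur prev : List (List Char)) (c : Char) : List (List Char) :=
  PySem.List.dedup (cur ++ prev.map (fun w => w ++ [c]))

-- the list comprehension over zip(levels, levels[1:])
def pvStepAux (prev : List (List Char)) (rest : List (List (List Char))) (c : Char) :
    List (List (List Char)) :=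
  match rest with
  | [] => []
  | cur :: rest' => pvExtend cur prev c :: pvStepAux cur rest' c

-- per-character update of levels: [levels[0]] + the comprehension
def pvStepB (levels : List (List (List Char))) (c : Char) : List (List (List Char)) :=
  match levels with
  | [] => []
  | L0 :: rest => L0 :: pvStepAux L0 rest c

def subsets_of_string_alt (string : String) (k : Int) : List String :=
  let n := PySem.Str.len string
  if k ≤ 0 ∨ n < k then []
  else
    let levels : List (List (List Char)) :=
      [[]] :: PySem.List.pyRepeat [([] : List (List Char))] k
    let levels := string.toList.foldl pvStepB levels
    (PySem.Set.ofList (PySem.List.pyGetD levels k [])).map String.ofList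

-- ===== PRECONDITION & SPEC =====
-- For k == 1 A returns the set of characters of the string PLUS the empty string ''
-- (a length-0 word smuggled in by its special-case branch); B returns just the distinct
-- characters, the correct set of length-1 subsequences.
def D_subsets_of_string (string : String) (k : Int) : Prop := k = 1
instance (string : String) (k : Int) : Decidable (D_subsets_of_string string k) := by
  unfold D_subsets_of_string; infer_instance

def Spec_subsets_of_string (string : String) (k : Int) (out : List String) : Prop :=
  ¬ D_subsets_of_string string k → out = subsets_of_string_alt string k
instance (string : String) (k : Int) (out : List String) :
    Decidable (Spec_subsets_of_string string k out) := by
  unfold Spec_subsets_of_string; infer_instance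

def pvDiffWitness_subsets_of_string : String × Int := ("a", 1)
def pvDiffWitnessOut_subsets_of_string : (List String) × (List String) := (["a", ""], ["a"])

-- ===== CLAIM (what is proved, stated in full; the proofs are below) =====
def Claim_unchanged_subsets_of_string : Prop := ∀ (string : String) (k : Int), Dom_subsets_of_string string k → Spec_subsets_of_string string k (subsets_of_string string k)
def Claim_changed_subsets_of_string : Prop := Dom_subsets_of_string (pvDiffWitness_subsets_of_string.1) (pvDiffWitness_subsets_of_string.2) ∧ D_subsets_of_string (pvDiffWitness_subsets_of_string.1) (pvDiffWitness_subsets_of_string.2) ∧ subsets_of_string (pvDiffWitness_subsets_of_string.1) (pvDiffWitness_subsets_of_string.2) = pvDiffWitnessOut_subsets_of_string.1 ∧ subsets_of_string_alt (pvDiffWitness_subsets_of_string.1) (pvDiffWitness_subsets_of_string.2) = pvDiffWitnessOut_subsets_of_string.2 ∧ pvDiffWitnessOut_subsets_of_string.1 ≠ pvDiffWitnessOut_subsets_of_string.2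
def Claim_exact_subsets_of_string : Prop := ∀ (string : String) (k : Int), Dom_subsets_of_string string k → D_subsets_of_string string k → subsets_of_string string k ≠ subsets_of_string_alt string k

-- ===== LEMMAS AND PROOFS =====

-- the reference objects the two ports are related through: A's (exponential) list of all
-- subsequence prefixes, and its per-length first-occurrence deduplication
def pvUpd (p : List (List Char)) (c : Char) : List (List Char) := p ++ p.map (· ++ [c])

def pvLvl (p : List (List Char)) (t : Nat) : PySem.Set (List Char) :=
  PySem.Set.ofList (p.filter (fun w => w.length == t))

-- ---- A side: the final output is the dedup of the length-k words of the prefix list ----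
lemma innerA_loop (k : Int) (c : Char) :
    ∀ (suf pre acc : List (List Char)) (out : PySem.Set (List Char)),
    (PySem.List.pyRange (pre.length) (pre.length + suf.length) 1).foldl (pvInnerA k c)
        (pre ++ suf ++ acc, out)
      = (pre ++ suf ++ (acc ++ suf.map (· ++ [c])),
         (suf.map (· ++ [c])).foldl
           (fun o w => if PySem.List.len w == k then PySem.Set.add o w else o) out) := by
  intro suf
  induction suf with
  | nil =>
    intro pre acc out
    rw [PySem.List.pyRange_one_eq_nil (by simp)]
    simp
  | cons w suf' ih =>
    intro pre acc out
    rw [PySem.List.pyRange_one_cons (by simp)]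
    simp only [List.foldl_cons]
    have hget : PySem.List.pyGetD (pre ++ (w :: suf') ++ acc) (pre.length) [] = w := by
      have : pre ++ (w :: suf') ++ acc = pre ++ w :: (suf' ++ acc) := by simp
      rw [show PySem.List.pyGetD (pre ++ (w :: suf') ++ acc) (pre.length) [] =
          (PySem.List.pyGet? (pre ++ (w :: suf') ++ acc) (pre.length)).getD [] from rfl,
        this, PySem.List.pyGet?_append_length]
      rfl
    show (PySem.List.pyRange ((pre.length : Int) + 1) (pre.length + (w :: suf').length) 1).foldl
        (pvInnerA k c) (pvInnerA k c (pre ++ (w :: suf') ++ acc, out) pre.length) = _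
    rw [show pvInnerA k c (pre ++ (w :: suf') ++ acc, out) (pre.length)
        = ((pre ++ [w]) ++ suf' ++ (acc ++ [w ++ [c]]),
           if PySem.List.len (w ++ [c]) == k then PySem.Set.add out (w ++ [c]) else out) by
      simp only [pvInnerA, hget]; simp]
    have hr : (PySem.List.pyRange ((pre.length : Int) + 1) (pre.length + (w :: suf').length) 1)
        = PySem.List.pyRange ((pre ++ [w]).length) ((pre ++ [w]).length + suf'.length) 1 := by
      congr 1 <;> simp
      omega
    rw [hr, ih]
    simp

lemma outerA_step (k : Int) (p : List (List Char)) (out : PySem.Set (List Char)) (c : Char) :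
    pvOuterA k (p, out) c
      = (pvUpd p c,
         (p.map (· ++ [c])).foldl
           (fun o w => if PySem.List.len w == k then PySem.Set.add o w else o) out) := by
  have h := innerA_loop k c p [] [] out
  simp only [List.length_nil, List.nil_append, List.append_nil, Nat.cast_zero, zero_add] at h
  simpa [pvOuterA, PySem.List.len_eq, pvUpd] using h

lemma outerA_fold (k : Int) :
    ∀ (s : List Char) (p : List (List Char)),
    s.foldl (pvOuterA k) (p, PySem.Set.ofList (p.filter (fun w => PySem.List.len w == k)))
      = (s.foldl pvUpd p,
         PySem.Set.ofList ((s.foldl pvUpd p).filter (fun w => PySem.List.len w == k))) := by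
  intro s
  induction s with
  | nil => intro p; rfl
  | cons c s' ih =>
    intro p
    simp only [List.foldl_cons]
    rw [outerA_step, PySem.List.foldl_if_eq_foldl_filter]
    have : (List.filter (fun w => PySem.List.len w == k) (p.map (· ++ [c]))).foldl PySem.Set.add
          (PySem.Set.ofList (p.filter (fun w => PySem.List.len w == k)))
        = PySem.Set.ofList ((pvUpd p c).filter (fun w => PySem.List.len w == k)) := by
      rw [pvUpd, List.filter_append, PySem.Set.ofList_append, PySem.Set.update]
    rw [this, ih]

-- ---- B side: each level is exactly that dedup, maintained incrementally ----
lemma update_map_ofList {α : Type} [BEq α] [LawfulBEq α] (f : α → α) :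
    ∀ (l : List α) (s : PySem.Set α),
    PySem.Set.update s ((PySem.Set.ofList l).map f) = PySem.Set.update s (l.map f) := by
  intro l
  induction l using List.reverseRecOn with
  | nil => intro s; rfl
  | append_singleton l x ih =>
    intro s
    rw [PySem.Set.ofList_append_singleton]
    by_cases hx : x ∈ PySem.Set.ofList l
    · rw [PySem.Set.add_of_mem hx, ih, List.map_append, List.map_singleton,
        PySem.Set.update_append]
      have hmem : f x ∈ PySem.Set.update s (l.map f) := by
        rw [PySem.Set.mem_update]
        exact Or.inr (List.mem_map_of_mem ((PySem.Set.mem_ofList _ _).mp hx))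
      rw [show PySem.Set.update (PySem.Set.update s (l.map f)) [f x]
          = PySem.Set.add (PySem.Set.update s (l.map f)) (f x) from rfl,
        PySem.Set.add_of_mem hmem]
    · rw [PySem.Set.add_of_not_mem hx, List.map_append, List.map_append,
        PySem.Set.update_append, PySem.Set.update_append, ih]

lemma extend_lvl (p : List (List Char)) (c : Char) (t : Nat) :
    pvExtend (pvLvl p (t+1)) (pvLvl p t) c = pvLvl (pvUpd p c) (t+1) := by
  rw [show pvExtend (pvLvl p (t+1)) (pvLvl p t) c
      = PySem.Set.update (PySem.Set.ofList (pvLvl p (t+1))) ((pvLvl p t).map (· ++ [c])) from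
    PySem.Set.ofList_append _ _]
  unfold pvLvl
  rw [PySem.Set.ofList_ofList, update_map_ofList]
  have h2 : (p.filter (fun w => w.length == t)).map (· ++ [c])
      = (p.map (· ++ [c])).filter (fun w => w.length == t+1) := by
    rw [List.filter_map]
    congr 1
    apply List.filter_congr
    intro w _
    simp [Function.comp]
  rw [h2]
  show _ = PySem.Set.ofList ((pvUpd p c).filter (fun w => w.length == t+1))
  rw [pvUpd, List.filter_append, PySem.Set.ofList_append]

lemma lvl_upd_zero (p : List (List Char)) (c : Char) : pvLvl (pvUpd p c) 0 = pvLvl p 0 := by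
  unfold pvLvl pvUpd
  rw [List.filter_append]
  have : (p.map (· ++ [c])).filter (fun w => w.length == 0) = [] := by
    rw [List.filter_map]
    have : List.filter ((fun (w : List Char) => w.length == 0) ∘ (· ++ [c])) p = [] := by
      apply List.filter_eq_nil_iff.mpr
      intro w _
      simp [Function.comp]
    rw [this]; rfl
  rw [this, List.append_nil]

lemma stepAux_lvls (c : Char) :
    ∀ (m t : Nat) (p : List (List Char)),
    pvStepAux (pvLvl p t) ((List.range m).map (fun j => pvLvl p (t+1+j))) c
      = (List.range m).map (fun j => pvLvl (pvUpd p c) (t+1+j)) := by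
  intro m
  induction m with
  | zero => intro t p; rfl
  | succ m ih =>
    intro t p
    rw [List.range_succ_eq_map]
    simp only [List.map_cons, List.map_map]
    rw [show (t + 1 + 0) = t + 1 from rfl]
    show pvExtend (pvLvl p (t+1)) (pvLvl p t) c :: pvStepAux (pvLvl p (t+1)) _ c = _
    rw [extend_lvl]
    have hf : ((fun j => pvLvl p (t+1+j)) ∘ Nat.succ) = (fun j => pvLvl p ((t+1)+1+j)) := by
      funext j
      simp only [Function.comp]
      congr 1
      omega
    rw [hf, ih (t+1)]
    have hg : ((fun j => pvLvl (pvUpd p c) (t+1+j)) ∘ Nat.succ)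
        = (fun j => pvLvl (pvUpd p c) ((t+1)+1+j)) := by
      funext j
      simp only [Function.comp]
      congr 1
      omega
    rw [hg]

lemma outerB_fold (K : Nat) :
    ∀ (s : List Char) (p : List (List Char)),
    s.foldl pvStepB
      (pvLvl p 0 :: (List.range K).map (fun j => pvLvl p (1+j)))
      = pvLvl (s.foldl pvUpd p) 0
          :: (List.range K).map (fun j => pvLvl (s.foldl pvUpd p) (1+j)) := by
  intro s
  induction s with
  | nil => intro p; rfl
  | cons c' s' ih =>
    intro p
    simp only [List.foldl_cons]
    show List.foldl pvStepB (pvLvl p 0 :: pvStepAux (pvLvl p 0) ((List.range K).map (fun j => pvLvl p (1+j))) c') s' = _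
    rw [show (fun j => pvLvl p (1+j)) = (fun j => pvLvl p (0+1+j)) by funext j; rfl]
    rw [stepAux_lvls c' K 0 p]
    rw [show (fun j => pvLvl (pvUpd p c') (0+1+j)) = (fun j => pvLvl (pvUpd p c') (1+j)) by funext j; rfl]
    rw [← lvl_upd_zero p c']
    exact ih (pvUpd p c')

-- every word A ever builds is no longer than the input read so far
lemma perm_len_le :
    ∀ (s : List Char) (p : List (List Char)) (m : Nat),
    (∀ w ∈ p, w.length ≤ m) → ∀ w ∈ s.foldl pvUpd p, w.length ≤ m + s.length := by
  intro s
  induction s with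
  | nil => intro p m h w hw; simpa using h w hw
  | cons c s' ih =>
    intro p m h w hw
    simp only [List.foldl_cons] at hw
    have h' : ∀ w ∈ pvUpd p c, w.length ≤ m + 1 := by
      intro w hw
      rcases List.mem_append.mp hw with h1 | h1
      · exact le_trans (h w h1) (Nat.le_succ m)
      · rcases List.mem_map.mp h1 with ⟨v, hv, rfl⟩
        have := h v hv
        simp only [List.length_append, List.length_cons, List.length_nil]
        omega
    have := ih (pvUpd p c) (m+1) h' w hw
    simpa [Nat.add_assoc, Nat.add_comm, Nat.add_left_comm] using this

-- ---- closed forms of the two ports and their agreement ----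
lemma A_closed (string : String) (k : Int) (hk0 : ¬ k = 0) (hk1 : ¬ k = 1) :
    subsets_of_string string k
      = (PySem.Set.ofList ((string.toList.foldl pvUpd [[]]).filter
          (fun w => PySem.List.len w == k))).map String.ofList := by
  have hP : ((PySem.List.len ([] : List Char) == k)) = false :=
    beq_eq_false_iff_ne.mpr (fun h => hk0 h.symm)
  have hempty : (PySem.Set.empty : PySem.Set (List Char))
      = PySem.Set.ofList (([[]] : List (List Char)).filter (fun w => PySem.List.len w == k)) := by
    rw [List.filter_cons, hP]
    rfl
  simp only [subsets_of_string]
  rw [if_neg hk0, if_neg hk1, hempty, outerA_fold]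

lemma altB_closed (string : String) (k : Int) (h1 : 1 ≤ k) (h2 : k ≤ PySem.Str.len string) :
    subsets_of_string_alt string k
      = (pvLvl (string.toList.foldl pvUpd [[]]) k.toNat).map String.ofList := by
  simp only [subsets_of_string_alt]
  rw [if_neg (by omega)]
  have hinit : (([[]] : List (List Char)) :: PySem.List.pyRepeat [([] : List (List Char))] k)
      = pvLvl [[]] 0 :: (List.range k.toNat).map (fun j => pvLvl [[]] (1+j)) := by
    rw [PySem.List.pyRepeat_singleton]
    congr 1
    symm
    have hj : ∀ j, pvLvl ([[]] : List (List Char)) (1+j) = [] := by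
      intro j
      unfold pvLvl
      rw [show List.filter (fun w : List Char => w.length == 1+j) ([[]] : List (List Char)) = [] from by
        simp; omega]
      rfl
    calc (List.range k.toNat).map (fun j => pvLvl ([[]] : List (List Char)) (1+j))
        = (List.range k.toNat).map (fun _ => ([] : List (List Char))) :=
          List.map_congr_left (fun j _ => hj j)
      _ = List.replicate k.toNat [] := by
          rw [List.map_const', List.length_range]
  rw [hinit, outerB_fold]
  obtain ⟨K', hK⟩ : ∃ K', k.toNat = K' + 1 := ⟨k.toNat - 1, by omega⟩
  have hk' : k = ((K' + 1 : Nat) : Int) := by omega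
  rw [hK, hk']
  rw [PySem.List.pyGetD_natCast]
  have : (pvLvl (string.toList.foldl pvUpd [[]]) 0 ::
      (List.range (K'+1)).map (fun j => pvLvl (string.toList.foldl pvUpd [[]]) (1+j))).getD (K'+1) []
      = pvLvl (string.toList.foldl pvUpd [[]]) (1+K') := by
    rw [List.getD_cons_succ]
    rw [List.getD_eq_getElem _ _ (by simp)]
    simp
  rw [this, show 1 + K' = K' + 1 from by omega, ← hK]
  unfold pvLvl
  rw [PySem.Set.ofList_ofList]

lemma beq_len_toNat (k : Int) (h1 : 1 ≤ k) :
    ∀ w : List Char, (PySem.List.len w == k) = (w.length == k.toNat) := by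
  intro w
  rw [PySem.List.len_eq]
  by_cases h : (w.length : Int) = k
  · simp [show w.length = k.toNat from by omega]
    omega
  · simp [h, show ¬ w.length = k.toNat from by omega]

lemma final_eq (string : String) (k : Int) (hk0 : ¬ k = 0) (hk1 : ¬ k = 1) :
    subsets_of_string string k = subsets_of_string_alt string k := by
  by_cases hsm : k ≤ 0 ∨ PySem.Str.len string < k
  · rw [A_closed string k hk0 hk1]
    simp only [subsets_of_string_alt]
    rw [if_pos hsm]
    have hnil : (string.toList.foldl pvUpd [[]]).filter (fun w => PySem.List.len w == k) = [] := by
      apply List.filter_eq_nil_iff.mpr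
      intro w hw
      have hlen : w.length ≤ string.toList.length := by
        have := perm_len_le string.toList [[]] 0 (by intro v hv; simp at hv; simp [hv]) w hw
        omega
      have hn : PySem.Str.len string = (string.toList.length : Int) := PySem.Str.len_eq string
      rw [PySem.List.len_eq]
      simp only [beq_iff_eq]
      omega
    rw [hnil]
    rfl
  · have h1' : 1 ≤ k := by omega
    have h2 : k ≤ PySem.Str.len string := by omega
    rw [A_closed string k hk0 hk1, altB_closed string k h1' h2]
    rw [List.filter_congr (fun w _ => beq_len_toNat k h1' w)]
    rfl

-- ===== VERDICT (by name: the statement is the Claim_ definition above) =====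
theorem subsets_of_string_spec : Claim_unchanged_subsets_of_string := by
  intro string k _ hD
  by_cases hk0 : k = 0
  · subst hk0
    simp [subsets_of_string, subsets_of_string_alt]
  · exact final_eq string k hk0 hD

theorem subsets_of_string_changed : Claim_changed_subsets_of_string := by
  unfold Claim_changed_subsets_of_string; decide

theorem subsets_of_string_tight : Claim_exact_subsets_of_string := by
  intro string k _ hDk
  have hk1 : k = 1 := hDk
  subst hk1
  have hA : "" ∈ subsets_of_string string 1 := by
    simp only [subsets_of_string, if_neg (by omega : ¬ (1:Int) = 0)]
    refine List.mem_map.mpr ⟨[], ?_, rfl⟩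
    exact (PySem.Set.mem_add _ _ _).mpr (Or.inr rfl)
  by_cases hn : PySem.Str.len string < 1
  · have hB : subsets_of_string_alt string 1 = [] := by
      simp only [subsets_of_string_alt]
      rw [if_pos (Or.inr hn)]
    intro h
    rw [h, hB] at hA
    exact List.not_mem_nil hA
  · have h2 : (1:Int) ≤ PySem.Str.len string := by omega
    rw [altB_closed string 1 (by omega) h2]
    intro h
    rw [h] at hA
    rcases List.mem_map.mp hA with ⟨w, hw, hws⟩
    have hwl : w.length = 1 := by
      have := (PySem.Set.mem_ofList _ _).mp hw
      have := (List.mem_filter.mp this).2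
      simpa using this
    have : w = [] := by
      have := congrArg String.toList hws
      rw [String.toList_ofList] at this
      simpa using this
    rw [this] at hwl
    simp at hwl
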